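-- pv_equiv track=rewrite | github.com/jksimoniii/advent-of-code | 2019/src/01.py | calculate_fuel_requirements
-- ===== SOURCE A (Python) =====
-- import math
--
-- def calculate_fuel(mass):
--     return math.floor(mass / 3) - 2
--
-- def calculate_fuel_requirements(modules, include_fuel=False):
--     sum = 0
--     for module in modules:
--         fuel_mass = calculate_fuel(module)
--         sum += fuel_mass
--         if include_fuel:
--             while fuel_mass > 0:
--                 fuel_mass = calculate_fuel(fuel_mass)
--                 if fuel_mass > 0:
--                     sum += fuel_mass
--     return sum
-- ===== SOURCE B (Python) =====
-- import math
--
-- def calculate_fuel(mass):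
--     return math.floor(mass / 3) - 2
--
-- def total_added_fuel(mass):
--     f = calculate_fuel(mass)
--     if f <= 0:
--         return 0
--     return f + total_added_fuel(f)
--
-- def calculate_fuel_requirements(modules, include_fuel=False):
--     return sum(calculate_fuel(m) + (total_added_fuel(calculate_fuel(m)) if include_fuel else 0)
--                for m in modules)
-- ===== Notes on version B (the rewrite author's own statement) =====
-- stated objective: alternative
-- what changed: Replaces the accumulating while-loop inside the module loop by a recursive helper total_added_fuel over the fuel chain and computes the total as one sum over a generator per module.
import Mathlib
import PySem

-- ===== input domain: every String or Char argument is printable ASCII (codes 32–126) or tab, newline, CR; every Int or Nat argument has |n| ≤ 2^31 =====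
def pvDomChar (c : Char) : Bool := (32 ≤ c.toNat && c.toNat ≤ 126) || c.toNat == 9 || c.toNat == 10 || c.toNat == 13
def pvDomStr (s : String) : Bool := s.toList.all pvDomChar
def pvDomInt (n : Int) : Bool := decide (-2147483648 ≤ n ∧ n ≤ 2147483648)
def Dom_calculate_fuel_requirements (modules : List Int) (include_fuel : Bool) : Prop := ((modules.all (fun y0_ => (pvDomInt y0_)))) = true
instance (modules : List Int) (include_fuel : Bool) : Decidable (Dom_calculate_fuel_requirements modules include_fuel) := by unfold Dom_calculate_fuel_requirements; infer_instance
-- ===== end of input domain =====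

-- B replaces A's inner accumulating while-loop by a recursive fuel-chain helper and sums one expression per module (objective: alternative decomposition, same cost).

-- ===== PORT A =====
-- math.floor(mass / 3) - 2: for |mass| ≤ 2^31 the float division is exact enough that
-- math.floor(mass / 3) = mass // 3, so this is ported as floor division.
def calcFuel (mass : Int) : Int := PySem.Int.floordiv mass 3 - 2

-- the inner 'while fuel_mass > 0' loop of A, carrying (fuel_mass, sum)
def aWhile (fm s : Int) : Int :=
  if fm > 0 then
    let f := calcFuel fm
    aWhile f (if f > 0 then s + f else s)
  else s
termination_by fm.toNat
decreasing_by
  simp only [calcFuel, PySem.Int.floordiv_eq_ediv_of_pos (by omega : (0:Int) < 3)]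
  omega

def calculate_fuel_requirements (modules : List Int) (include_fuel : Bool) : Int :=
  modules.foldl (fun s module =>
    let fuel_mass := calcFuel module
    let s := s + fuel_mass
    if include_fuel then aWhile fuel_mass s else s) 0

-- ===== PORT B =====
-- total fuel added recursively on top of an initial fuel mass
def total_added_fuel (mass : Int) : Int :=
  let f := calcFuel mass
  if f ≤ 0 then 0 else f + total_added_fuel f
termination_by mass.toNat
decreasing_by
  rename_i h
  simp only [f, calcFuel, PySem.Int.floordiv_eq_ediv_of_pos (by omega : (0:Int) < 3)] at h ⊢
  omega

def calculate_fuel_requirements_alt (modules : List Int) (include_fuel : Bool) : Int :=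
  (modules.map (fun m =>
    calcFuel m + (if include_fuel then total_added_fuel (calcFuel m) else 0))).sum

-- ===== PRECONDITION & SPEC =====
def Spec_calculate_fuel_requirements (modules : List Int) (include_fuel : Bool) (out : Int) : Prop := out = calculate_fuel_requirements_alt modules include_fuel
instance (modules : List Int) (include_fuel : Bool) (out : Int) : Decidable (Spec_calculate_fuel_requirements modules include_fuel out) := by unfold Spec_calculate_fuel_requirements; infer_instance

-- ===== CLAIM (what is proved, stated in full; the proofs are below) =====
def Claim_equal_calculate_fuel_requirements : Prop := ∀ (modules : List Int) (include_fuel : Bool), Dom_calculate_fuel_requirements modules include_fuel → Spec_calculate_fuel_requirements modules include_fuel (calculate_fuel_requirements modules include_fuel)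

-- ===== LEMMAS AND PROOFS =====

theorem aWhile_eq (fm s : Int) : aWhile fm s = s + total_added_fuel fm := by
  fun_induction aWhile fm s with
  | case1 fm s hpos f ih =>
    rw [total_added_fuel.eq_def]
    by_cases hf : f > 0
    · rw [dif_pos hf] at ih; rw [if_pos hf]
      rw [ih]
      simp only [f, calcFuel] at hf ⊢
      rw [if_neg (by omega : ¬ (PySem.Int.floordiv fm 3 - 2 ≤ 0))]
      ring
    · rw [dif_neg hf] at ih; rw [if_neg hf]
      rw [ih]
      simp only [f, calcFuel] at hf ⊢
      rw [if_pos (by omega : PySem.Int.floordiv fm 3 - 2 ≤ 0)]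
      have h0 : total_added_fuel (PySem.Int.floordiv fm 3 - 2) = 0 := by
        rw [total_added_fuel.eq_def]
        simp only [calcFuel, PySem.Int.floordiv_eq_ediv_of_pos (by omega : (0:Int) < 3)] at hf ⊢
        rw [if_pos (by omega)]
      rw [PySem.Int.floordiv_eq_ediv_of_pos (by omega : (0:Int) < 3)] at h0 ⊢
      rw [h0]
  | case2 fm s hpos =>
    rw [total_added_fuel.eq_def]
    have : calcFuel fm ≤ 0 := by
      simp only [calcFuel, PySem.Int.floordiv_eq_ediv_of_pos (by omega : (0:Int) < 3)]
      omega
    simp [this]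

theorem fold_eq (include_fuel : Bool) (l : List Int) (s : Int) :
    l.foldl (fun s module =>
      let fuel_mass := calcFuel module
      let s := s + fuel_mass
      if include_fuel then aWhile fuel_mass s else s) s
    = s + (l.map (fun m =>
        calcFuel m + (if include_fuel then total_added_fuel (calcFuel m) else 0))).sum := by
  induction l generalizing s with
  | nil => simp
  | cons m t ih =>
    simp only [List.foldl_cons, List.map_cons, List.sum_cons, ih]
    cases include_fuel with
    | false => simp; ring
    | true => simp [aWhile_eq]; ring

-- ===== VERDICT (by name: the statement is the Claim_ definition above) =====
theorem calculate_fuel_requirements_spec : Claim_equal_calculate_fuel_requirements := by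
  intro modules include_fuel _
  unfold Spec_calculate_fuel_requirements calculate_fuel_requirements calculate_fuel_requirements_alt
  rw [fold_eq]
  simp
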